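-- pv_equiv track=rewrite | github.com/conda/conda-build | conda_build/macho.py | _get_load_commands
-- ===== SOURCE A (Python) =====
-- def _get_load_commands(lines):
--     """yields each load command from the output of otool -l"""
--     a = 1 # first line is the filename.
--     for ln, line in enumerate(lines):
--         if line.startswith("Load command"):
--             if a < ln:
--                 yield lines[a:ln]
--             a = ln
--     yield lines[a:]
-- ===== SOURCE B (Python) =====
-- def _get_load_commands(lines):
--     """yields each load command from the output of otool -l"""
--     it = iter(lines)
--     first = next(it, None)
--     # the filename line is dropped, unless it itself opens a load command
--     cur = [first] if first is not None and first.startswith("Load command") else []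
--     for line in it:
--         if line.startswith("Load command"):
--             if cur:
--                 yield cur
--             cur = [line]
--         else:
--             cur.append(line)
--     yield cur
-- ===== Notes on version B (the rewrite author's own statement) =====
-- stated objective: alternative
-- what changed: A scans enumerate(lines) keeping an integer boundary pointer and yields index slices lines[a:b]; B never indexes or slices at all: it groups the lines themselves with a running chunk accumulator, flushing the chunk when a 'Load command' line starts a new one and yielding the final chunk unconditionally.
import Mathlib
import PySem

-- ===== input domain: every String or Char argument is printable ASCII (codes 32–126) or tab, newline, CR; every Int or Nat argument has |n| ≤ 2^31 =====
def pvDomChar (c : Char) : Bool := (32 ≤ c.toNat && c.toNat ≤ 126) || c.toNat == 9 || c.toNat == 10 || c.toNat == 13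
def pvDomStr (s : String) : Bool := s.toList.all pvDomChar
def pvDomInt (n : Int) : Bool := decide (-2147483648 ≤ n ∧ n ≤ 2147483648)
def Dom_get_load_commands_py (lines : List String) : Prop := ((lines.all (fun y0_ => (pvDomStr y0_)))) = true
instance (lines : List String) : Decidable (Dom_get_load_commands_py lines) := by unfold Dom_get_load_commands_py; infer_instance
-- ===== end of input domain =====

-- B replaces A's index-pointer-and-slice scan by indexless grouping with a running
-- chunk accumulator (objective: alternative decomposition, same cost).

-- ===== PORT A =====
-- A: one pass over enumerate(lines) carrying (a, yielded-so-far); yields slices lines[a:ln]; final unconditional yield lines[a:].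
def get_load_commands_py (lines : List String) : List (List String) :=
  let st := (PySem.List.enumerate lines).foldl
    (fun (st : Int × List (List String)) p =>
      if PySem.Str.startswith p.2 "Load command" then
        (p.1, if st.1 < p.1 then st.2 ++ [PySem.List.slice lines (some st.1) (some p.1)] else st.2)
      else st)
    (1, [])
  st.2 ++ [PySem.List.slice lines (some st.1) none]

-- ===== PORT B =====
-- B: no indices or slices; the first line seeds the chunk only if it is itself a
-- 'Load command' line, then each line is appended to the running chunk, a boundary
-- line flushes the (nonempty) chunk, and the last chunk is yielded unconditionally.
def get_load_commands_py_alt (lines : List String) : List (List String) :=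
  let cur0 : List String :=
    match lines.head? with
    | some f => if PySem.Str.startswith f "Load command" then [f] else []
    | none => []
  let st := (lines.drop 1).foldl
    (fun (st : List (List String) × List String) line =>
      if PySem.Str.startswith line "Load command" then
        ((if st.2 ≠ [] then st.1 ++ [st.2] else st.1), [line])
      else (st.1, st.2 ++ [line]))
    ([], cur0)
  st.1 ++ [st.2]

-- ===== PRECONDITION & SPEC =====
def Spec_get_load_commands_py (lines : List String) (out : List (List String)) : Prop := out = get_load_commands_py_alt lines
instance (lines : List String) (out : List (List String)) : Decidable (Spec_get_load_commands_py lines out) := by unfold Spec_get_load_commands_py; infer_instance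

-- ===== CLAIM (what is proved, stated in full; the proofs are below) =====
def Claim_equal_get_load_commands_py : Prop := ∀ (lines : List String), Dom_get_load_commands_py lines → Spec_get_load_commands_py lines (get_load_commands_py lines)

-- ===== LEMMAS AND PROOFS =====

-- Invariant: when the scans have both consumed lines[0:k], A's pointer a and B's
-- chunk cur are related by cur = (lines.drop a).take (k - a), and the two residual
-- computations produce the same final list.
theorem pv_inv (lines : List String) :
    ∀ (rest : List String) (k a : Nat) (out : List (List String)),
      rest = lines.drop k → a ≤ k → k ≤ lines.length →
      (let st := (PySem.List.enumerate rest (k : Int)).foldl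
          (fun (st : Int × List (List String)) p =>
            if PySem.Str.startswith p.2 "Load command" then
              (p.1, if st.1 < p.1 then st.2 ++ [PySem.List.slice lines (some st.1) (some p.1)] else st.2)
            else st)
          ((a : Int), out)
       st.2 ++ [PySem.List.slice lines (some st.1) none])
      = (let st := rest.foldl
          (fun (st : List (List String) × List String) line =>
            if PySem.Str.startswith line "Load command" then
              ((if st.2 ≠ [] then st.1 ++ [st.2] else st.1), [line])
            else (st.1, st.2 ++ [line]))
          (out, (lines.drop a).take (k - a))
         st.1 ++ [st.2]) := by
  intro rest
  induction rest with
  | nil =>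
    intro k a out hk ha hlen
    simp only [PySem.List.enumerate_nil, List.foldl_nil]
    have hk' : k = lines.length := by
      have := congrArg List.length hk
      simp at this; omega
    rw [PySem.List.slice_from_natCast]
    have : (lines.drop a).take (k - a) = lines.drop a := by
      apply List.take_of_length_le
      simp; omega
    rw [this]
  | cons x xs ih =>
    intro k a out hk ha hlen
    have hx : lines[k]? = some x := by
      rw [← List.head?_drop, ← hk]; rfl
    have hklt : k < lines.length := (List.getElem?_eq_some_iff.mp hx).1
    have hxs : xs = lines.drop (k + 1) := by
      rw [← List.tail_drop, ← hk]; rfl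
    rw [PySem.List.enumerate_cons]
    simp only [List.foldl_cons]
    by_cases hb : PySem.Str.startswith x "Load command"
    · -- boundary line: A yields the slice iff a < k; B flushes cur iff cur ≠ []
      simp only [hb, if_true]
      have hcur : PySem.List.slice lines (some (a : Int)) (some (k : Int))
          = (lines.drop a).take (k - a) := PySem.List.slice_natCast lines a k
      have hcurlen : ((lines.drop a).take (k - a)).length = k - a := by
        simp; omega
      have hiff : ((a : Int) < (k : Int)) ↔ ((lines.drop a).take (k - a) ≠ []) := by
        rw [← List.length_pos_iff, hcurlen]
        constructor <;> intro h <;> [omega; exact_mod_cast (by omega : (a:Int) < k)]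
      have h1 := ih (k + 1) k (if (lines.drop a).take (k - a) ≠ [] then out ++ [(lines.drop a).take (k - a)] else out) hxs (by omega) (by omega)
      have hnewcur : (lines.drop k).take (k + 1 - k) = [x] := by
        rw [← hk]
        simp
      rw [hnewcur] at h1
      rw [show ((k : Int) + 1) = ((k + 1 : Nat) : Int) by push_cast; ring]
      rw [hcur]
      by_cases hne : (lines.drop a).take (k - a) ≠ []
      · rw [if_pos (hiff.mpr hne), if_pos hne] at *
        exact h1
      · rw [if_neg (fun hlt => hne (hiff.mp hlt)), if_neg hne] at *
        exact h1
    · -- ordinary line: A's state is unchanged; B appends the line to cur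
      simp only [hb]
      have h1 := ih (k + 1) a out hxs (by omega) (by omega)
      have hstep : (lines.drop a).take (k + 1 - a) = (lines.drop a).take (k - a) ++ [x] := by
        have : k + 1 - a = (k - a) + 1 := by omega
        rw [this, List.take_add_one]
        have : (lines.drop a)[k - a]? = some x := by
          rw [List.getElem?_drop]
          rw [show a + (k - a) = k by omega]
          exact hx
        rw [this]; rfl
      rw [hstep] at h1
      rw [show ((k : Int) + 1) = ((k + 1 : Nat) : Int) by push_cast; ring]
      exact h1

-- ===== VERDICT (by name: the statement is the Claim_ definition above) =====
theorem get_load_commands_py_spec : Claim_equal_get_load_commands_py := by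
  intro lines _
  unfold Spec_get_load_commands_py get_load_commands_py get_load_commands_py_alt
  cases lines with
  | nil => decide
  | cons f rest =>
    simp only [List.head?_cons, List.drop_succ_cons, List.drop_zero]
    rw [PySem.List.enumerate_cons]
    simp only [List.foldl_cons]
    by_cases hb : PySem.Str.startswith f "Load command"
    · -- the first line itself opens a load command: A moves the pointer to 0, B seeds cur with [f]
      simp only [hb, if_true, show ¬((1 : Int) < 0) by decide, if_false]
      have h := pv_inv (f :: rest) rest 1 0 [] (by simp) (by omega) (by simp)
      simpa using h
    · -- ordinary first line: A keeps a = 1 (skipping it), B's cur starts empty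
      simp only [hb, Bool.false_eq_true, if_false]
      have h := pv_inv (f :: rest) rest 1 1 [] (by simp) (by omega) (by simp)
      simpa using h
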